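-- pv_equiv track=rewrite | github.com/Phucptit2003/Python-PTIT | SoLocPhatDep.py | check
-- ===== SOURCE A (Python) =====
-- def check(s):
--     for i in s:
--         if i!='8' and i!='6':
--             return False
--     i=0
--     a=[int(i) for i in s]
--     for i in range(len(a)):
--         if a[0]==8:
--             return False
--         if a[i]==8 and a[i-1]!=6 and a[i-1]!=8:
--             return False
--         if i>1 and a[i]==8 and a[i-1]==8 and a[i-2]!=6:
--             return False
--
--     return True
-- ===== SOURCE B (Python) =====
-- def check(s):
--     return all(c in '68' for c in s) and not s.startswith('8') and '888' not in s
-- ===== Notes on version B (the rewrite author's own statement) =====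
-- stated objective: simpler
-- what changed: Replaces A's two sequential loops (char validation, then an index loop over an int list with negative-index and triple-8 window checks, whose second branch is dead) by three whole-string predicates: all chars in '68', first char not '8', and no '888' substring.
import Mathlib
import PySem

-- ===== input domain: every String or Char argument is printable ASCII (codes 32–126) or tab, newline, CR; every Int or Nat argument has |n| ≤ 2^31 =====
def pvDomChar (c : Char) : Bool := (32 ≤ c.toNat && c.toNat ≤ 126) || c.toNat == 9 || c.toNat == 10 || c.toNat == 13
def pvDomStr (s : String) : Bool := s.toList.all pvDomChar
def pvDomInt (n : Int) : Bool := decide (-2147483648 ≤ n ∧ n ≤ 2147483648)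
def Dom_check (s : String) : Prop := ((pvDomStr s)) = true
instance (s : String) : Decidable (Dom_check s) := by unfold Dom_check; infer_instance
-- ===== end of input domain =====

-- B replaces A's two sequential loops by three whole-string predicates
-- (all chars in '68', does not start with '8', no '888' substring); objective: simpler.

-- ===== PORT A =====
-- int(i) for a one-char string i; the default 0 is never reached: A only builds the
-- int list after its first loop has confirmed every char is '6' or '8' (both digits).
def pvDigit (c : Char) : Int := (PySem.Int.ofStr? (String.ofList [c])).getD 0

-- second loop 'for i in range(len(a)):' with its three early-return branches, in order
def checkGo2 (a : List Int) (i : Nat) : Bool :=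
  if _h : i < a.length then
    if PySem.List.pyGetD a 0 0 = 8 then false
    else if PySem.List.pyGetD a (i : Int) 0 = 8 ∧ PySem.List.pyGetD a ((i : Int) - 1) 0 ≠ 6
              ∧ PySem.List.pyGetD a ((i : Int) - 1) 0 ≠ 8 then false
    else if 1 < i ∧ PySem.List.pyGetD a (i : Int) 0 = 8 ∧ PySem.List.pyGetD a ((i : Int) - 1) 0 = 8
              ∧ PySem.List.pyGetD a ((i : Int) - 2) 0 ≠ 6 then false
    else checkGo2 a (i + 1)
  else true
termination_by a.length - i

-- first loop 'for i in s:' with early return, then a = [int(i) for i in s] and the second loop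
def checkGo1 (s : String) : List Char → Bool
  | [] => checkGo2 (s.toList.map pvDigit) 0
  | c :: rest => if c ≠ '8' ∧ c ≠ '6' then false else checkGo1 s rest

def check (s : String) : Bool := checkGo1 s s.toList

-- ===== PORT B =====
def check_alt (s : String) : Bool :=
  (s.toList.all fun c => PySem.Chars.isIn [c] "68".toList)
    && !(PySem.Str.startswith s "8")
    && !(PySem.Str.isIn "888" s)

-- ===== PRECONDITION & SPEC =====
def Spec_check (s : String) (out : Bool) : Prop := out = check_alt s
instance (s : String) (out : Bool) : Decidable (Spec_check s out) := by unfold Spec_check; infer_instance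

-- ===== CLAIM (what is proved, stated in full; the proofs are below) =====
def Claim_equal_check : Prop := ∀ (s : String), Dom_check s → Spec_check s (check s)

-- ===== LEMMAS AND PROOFS =====

theorem pvDigit_six : pvDigit '6' = 6 := by decide
theorem pvDigit_eight : pvDigit '8' = 8 := by decide

-- if some char of the suffix is bad, loop 1 returns False
theorem go1_bad (s : String) (l : List Char) (h : ∃ c ∈ l, ¬(c = '6' ∨ c = '8')) :
    checkGo1 s l = false := by
  induction l with
  | nil => simp at h
  | cons c rest ih =>
    rcases h with ⟨d, hd, hbad⟩
    by_cases hc : c ≠ '8' ∧ c ≠ '6'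
    · simp [checkGo1, hc]
    · rcases List.mem_cons.mp hd with rfl | hm
      · exfalso; tauto
      · simp [checkGo1, hc, ih ⟨d, hm, hbad⟩]

-- if every char of the suffix is good, loop 1 falls through to loop 2
theorem go1_good (s : String) (l : List Char) (h : ∀ c ∈ l, c = '6' ∨ c = '8') :
    checkGo1 s l = checkGo2 (s.toList.map pvDigit) 0 := by
  induction l with
  | nil => rfl
  | cons c rest ih =>
    have hc : ¬(c ≠ '8' ∧ c ≠ '6') := by
      rcases h c List.mem_cons_self with h' | h' <;> simp [h']
    simp only [checkGo1, hc, if_neg, not_false_iff]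
    exact ih fun d hd => h d (List.mem_cons_of_mem _ hd)

theorem pvDigit_eq_eight_iff {c : Char} (h : c = '6' ∨ c = '8') :
    pvDigit c = 8 ↔ c = '8' := by
  rcases h with h | h <;> subst h <;> simp [pvDigit_six, pvDigit_eight]

-- 'has three consecutive 8s starting at position j'
def tripleAt (l : List Char) (j : Nat) : Prop :=
  l[j]? = some '8' ∧ l[j+1]? = some '8' ∧ l[j+2]? = some '8'

theorem tripleAt_lt {l : List Char} {j : Nat} (h : tripleAt l j) : j + 2 < l.length := by
  obtain ⟨_, _, t2⟩ := h
  by_contra hh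
  rw [List.getElem?_eq_none (by omega)] at t2
  simp at t2

theorem prefix_three_iff (x y z : Char) (m : List Char) :
    [x, y, z] <+: m ↔ m[0]? = some x ∧ m[1]? = some y ∧ m[2]? = some z := by
  match m with
  | [] => simp
  | [a] => simp [List.prefix_cons_iff]
  | [a, b] => simp [List.cons_prefix_cons]
  | a :: b :: c :: t => simp [List.cons_prefix_cons, eq_comm]

theorem isIn_888_iff (l : List Char) :
    PySem.Chars.isIn ['8', '8', '8'] l = true ↔ ∃ j, tripleAt l j := by
  rw [← PySem.Chars.exists_prefix_drop_iff_isIn]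
  constructor
  · rintro ⟨j, hj⟩
    refine ⟨j, ?_⟩
    have h := (prefix_three_iff '8' '8' '8' (l.drop j)).mp hj
    simpa [tripleAt, List.getElem?_drop, Nat.add_comm] using h
  · rintro ⟨j, hj⟩
    refine ⟨j, (prefix_three_iff '8' '8' '8' (l.drop j)).mpr ?_⟩
    simpa [tripleAt, List.getElem?_drop, Nat.add_comm] using hj

-- A's second loop returns True once i has passed the end of the list
theorem go2_past (l : List Char) (i : Nat) (hi : l.length ≤ i) :
    (checkGo2 (l.map pvDigit) i = true ↔ ∀ j, i ≤ j + 2 → ¬ tripleAt l j) := by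
  rw [checkGo2, dif_neg (by simp; omega)]
  constructor
  · intro _ j hj htrip
    have := tripleAt_lt htrip
    omega
  · intro _; rfl

-- characterisation of A's second loop from index i on, for a good string starting with '6'
theorem go2_iff (l : List Char) (hgood : ∀ c ∈ l, c = '6' ∨ c = '8')
    (hhead : l[0]? = some '6') :
    ∀ i, checkGo2 (l.map pvDigit) i = true ↔ ∀ j, i ≤ j + 2 → ¬ tripleAt l j := by
  have hlen : (l.map pvDigit).length = l.length := by simp
  have hmem : ∀ x ∈ l.map pvDigit, x = 6 ∨ x = 8 := by
    intro x hx
    rcases List.mem_map.mp hx with ⟨c, hc, rfl⟩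
    rcases hgood c hc with h | h <;> subst h <;> simp [pvDigit_six, pvDigit_eight]
  have hget : ∀ (k : Nat) (hk : k < l.length),
      PySem.List.pyGetD (l.map pvDigit) (k : Int) 0 = pvDigit (l[k]'hk) := by
    intro k hk
    rw [PySem.List.pyGetD_natCast, List.getD_eq_getElem?_getD]
    simp [hk]
  have h8iff : ∀ (k : Nat) (hk : k < l.length),
      (PySem.List.pyGetD (l.map pvDigit) (k : Int) 0 = 8 ↔ l[k]? = some '8') := by
    intro k hk
    rw [hget k hk, List.getElem?_eq_getElem hk]
    simp only [Option.some.injEq]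
    exact pvDigit_eq_eight_iff (hgood _ (List.getElem_mem _))
  have main : ∀ n i, l.length ≤ i + n →
      (checkGo2 (l.map pvDigit) i = true ↔ ∀ j, i ≤ j + 2 → ¬ tripleAt l j) := by
    intro n
    induction n with
    | zero => intro i hi; exact go2_past l i (by omega)
    | succ n ihn =>
      intro i hi
      by_cases hil : i < l.length
      · have hi' : i < (l.map pvDigit).length := by omega
        have hc1 : ¬ (PySem.List.pyGetD (l.map pvDigit) 0 0 = 8) := by
          intro hcon
          have h := (h8iff 0 (by omega)).mp (by exact_mod_cast hcon)
          rw [hhead] at h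
          exact absurd h (by decide)
        have hprev : PySem.List.pyGetD (l.map pvDigit) ((i : Int) - 1) 0 = 6 ∨
            PySem.List.pyGetD (l.map pvDigit) ((i : Int) - 1) 0 = 8 := by
          apply hmem
          apply PySem.List.pyGetD_mem (l.map pvDigit) 0
          unfold PySem.Raise.InRange
          simp
          omega
        have hc2 : ¬ (PySem.List.pyGetD (l.map pvDigit) (i : Int) 0 = 8 ∧
            PySem.List.pyGetD (l.map pvDigit) ((i : Int) - 1) 0 ≠ 6 ∧
            PySem.List.pyGetD (l.map pvDigit) ((i : Int) - 1) 0 ≠ 8) := by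
          rintro ⟨_, h6, h8⟩
          rcases hprev with h | h
          · exact h6 h
          · exact h8 h
        rw [checkGo2, dif_pos hi', if_neg hc1, if_neg hc2]
        by_cases hc3 : 1 < i ∧ PySem.List.pyGetD (l.map pvDigit) (i : Int) 0 = 8 ∧
            PySem.List.pyGetD (l.map pvDigit) ((i : Int) - 1) 0 = 8 ∧
            PySem.List.pyGetD (l.map pvDigit) ((i : Int) - 2) 0 ≠ 6
        · rw [if_pos hc3]
          obtain ⟨hi1, he0, he1, he2⟩ := hc3
          have hin : PySem.Raise.InRange (l.map pvDigit).length ((i : Int) - 2) := by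
            unfold PySem.Raise.InRange
            simp
            omega
          have e2 : PySem.List.pyGetD (l.map pvDigit) ((i : Int) - 2) 0 = 8 := by
            rcases hmem _ (PySem.List.pyGetD_mem (l.map pvDigit) 0 hin) with h | h
            · exact absurd h he2
            · exact h
          have c1 : ((i : Int) - 1) = ((i - 1 : Nat) : Int) := by omega
          have c2 : ((i : Int) - 2) = ((i - 2 : Nat) : Int) := by omega
          rw [c1] at he1
          rw [c2] at e2
          have htrip : tripleAt l (i - 2) := by
            refine ⟨(h8iff (i - 2) (by omega)).mp e2, ?_, ?_⟩
            · have : i - 2 + 1 = i - 1 := by omega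
              rw [this]
              exact (h8iff (i - 1) (by omega)).mp he1
            · have : i - 2 + 2 = i := by omega
              rw [this]
              exact (h8iff i hil).mp he0
          constructor
          · intro h; exact Bool.noConfusion h
          · intro h; exact absurd htrip (h (i - 2) (by omega))
        · rw [if_neg hc3, ihn (i + 1) (by omega)]
          constructor
          · intro h j hj htrip
            by_cases hj1 : i + 1 ≤ j + 2
            · exact h j hj1 htrip
            · have hji : i = j + 2 := by omega
              obtain ⟨t0, t1, t2⟩ := htrip
              have hjl : j + 2 < l.length := tripleAt_lt ⟨t0, t1, t2⟩
              apply hc3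
              refine ⟨by omega, ?_, ?_, ?_⟩
              · apply (h8iff i (by omega)).mpr
                rw [hji]; exact t2
              · have c1 : ((i : Int) - 1) = ((j + 1 : Nat) : Int) := by omega
                rw [c1]
                exact (h8iff (j + 1) (by omega)).mpr t1
              · have c2 : ((i : Int) - 2) = ((j : Nat) : Int) := by omega
                rw [c2, hget j (by omega)]
                have hj8 : l[j]'(by omega) = '8' := by
                  have := List.getElem?_eq_getElem (show j < l.length by omega)
                  rw [t0] at this
                  exact (Option.some.injEq _ _).mp this.symm
                rw [hj8, pvDigit_eight]
                decide
          · intro h j hj htrip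
            exact h j (by omega) htrip
      · exact go2_past l i (by omega)
  intro i
  exact main l.length i (by omega)

theorem startswith_eight_iff (s : String) :
    PySem.Str.startswith s "8" = true ↔ s.toList[0]? = some '8' := by
  rw [PySem.Str.startswith_eq, PySem.Chars.startswith_iff]
  cases h : s.toList with
  | nil => simp
  | cons c t => simp [List.cons_prefix_cons, eq_comm]

-- ===== VERDICT (by name: the statement is the Claim_ definition above) =====
theorem check_spec : Claim_equal_check := by
  intro s _dom
  unfold Spec_check check check_alt
  by_cases hall : ∀ c ∈ s.toList, c = '6' ∨ c = '8'
  · -- loop 1 passes; B's first conjunct is true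
    have hB1 : (s.toList.all fun c => PySem.Chars.isIn [c] "68".toList) = true := by
      rw [List.all_eq_true]
      intro c hc
      rw [PySem.Chars.isIn_iff_infix, List.singleton_infix_iff]
      rcases hall c hc with h | h <;> subst h <;> decide
    rw [go1_good s s.toList hall, hB1]
    cases hhead : s.toList[0]? with
    | none =>
      -- empty string: loop 2 body never runs; B's remaining tests are vacuous
      have hnil : s.toList = [] := by
        cases h : s.toList with
        | nil => rfl
        | cons c t => rw [h] at hhead; simp at hhead
      have hA : checkGo2 (s.toList.map pvDigit) 0 = true := by
        rw [hnil, checkGo2]; simp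
      have hS : PySem.Str.startswith s "8" = false := by
        rw [Bool.eq_false_iff]
        intro h
        rw [startswith_eight_iff] at h
        rw [h] at hhead; simp at hhead
      have hI : PySem.Str.isIn "888" s = false := by
        rw [Bool.eq_false_iff]
        intro h
        rw [PySem.Str.isIn_eq] at h
        rcases (isIn_888_iff s.toList).mp h with ⟨j, t0, _, _⟩
        rw [hnil] at t0; simp at t0
      rw [hA, hS, hI]; rfl
    | some c =>
      rcases hall c (by
        have hlt : 0 < s.toList.length := by
          cases h : s.toList with
          | nil => rw [h] at hhead; simp at hhead
          | cons a t => simp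
        have := List.getElem?_eq_getElem hlt
        rw [hhead] at this
        have hc0 : s.toList[0] = c := (Option.some.injEq _ _).mp this.symm
        rw [← hc0]; exact List.getElem_mem _) with h6 | h8
      · -- starts with '6': A = no-triple test, B = not-startswith && not-888
        subst h6
        have hS : PySem.Str.startswith s "8" = false := by
          rw [Bool.eq_false_iff]
          intro h
          rw [startswith_eight_iff, hhead] at h
          simp at h
        rw [hS]
        have hiff := go2_iff s.toList hall hhead 0
        cases hI : PySem.Str.isIn "888" s with
        | true =>
          rw [PySem.Str.isIn_eq] at hI
          rcases (isIn_888_iff s.toList).mp hI with ⟨j, htrip⟩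
          have : checkGo2 (s.toList.map pvDigit) 0 = false := by
            rw [Bool.eq_false_iff]
            intro h
            exact (hiff.mp h) j (by omega) htrip
          rw [this]; rfl
        | false =>
          have : checkGo2 (s.toList.map pvDigit) 0 = true := by
            rw [hiff]
            intro j _ htrip
            have : PySem.Str.isIn "888" s = true := by
              rw [PySem.Str.isIn_eq]
              exact (isIn_888_iff s.toList).mpr ⟨j, htrip⟩
            rw [hI] at this; exact absurd this (by decide)
          rw [this]; rfl
      · -- starts with '8': both sides false
        subst h8
        have hS : PySem.Str.startswith s "8" = true := by
          rw [startswith_eight_iff]; exact hhead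
        have hA : checkGo2 (s.toList.map pvDigit) 0 = false := by
          have hlt : 0 < s.toList.length := by
            cases h : s.toList with
            | nil => rw [h] at hhead; simp at hhead
            | cons a t => simp
          rw [checkGo2]
          have hl : (0 : Nat) < (s.toList.map pvDigit).length := by simpa using hlt
          have h08 : PySem.List.pyGetD (s.toList.map pvDigit) 0 0 = 8 := by
            rw [PySem.List.pyGetD_zero, List.getD_eq_getElem?_getD]
            have := List.getElem?_eq_getElem hl
            rw [this]
            have : (s.toList.map pvDigit)[0] = pvDigit s.toList[0] := by
              simp
            rw [this]
            have hc0 : s.toList[0] = '8' := by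
              have := List.getElem?_eq_getElem hlt
              rw [hhead] at this
              exact (Option.some.injEq _ _).mp this.symm
            rw [hc0, pvDigit_eight]; rfl
          have hslen : 0 < s.length := by simpa using hlt
          simp [h08, hslen]
        rw [hA, hS]; rfl
  · -- a bad char: loop 1 returns False; B's first conjunct is false
    obtain ⟨c, hcb⟩ := not_forall.mp hall
    obtain ⟨hc, hbad⟩ := Classical.not_imp.mp hcb
    rw [go1_bad s s.toList ⟨c, hc, hbad⟩]
    have : (s.toList.all fun d => PySem.Chars.isIn [d] "68".toList) = false := by
      rw [Bool.eq_false_iff, Ne, List.all_eq_true]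
      intro h
      have hmem' := h c hc
      rw [PySem.Chars.isIn_iff_infix, List.singleton_infix_iff] at hmem'
      exact hbad (by simpa using hmem')
    rw [this]; rfl
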